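-- pv_equiv track=rewrite | github.com/don-alejandrino/aoc2024 | src/23.py | dfs_recursion
-- ===== SOURCE A (Python) =====
-- def dfs_recursion(
--         node: str,
--         start_node: str,
--         previous_node: str | None,
--         graph: dict[str, set[str]],
--         recursion_level: int,
--         max_recursion_level: int,
-- ) -> list[list[str]]:
--     cycle_chains = []
--     if recursion_level < max_recursion_level:
--         for neighbor in graph[node]:
--             if neighbor != previous_node:
--                 for chain in dfs_recursion(
--                     neighbor,
--                     start_node,
--                     node,
--                     graph,
--                     recursion_level + 1,
--                     max_recursion_level,
--                 ):
--                     if previous_node is None: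
--                         cycle_chains.append(chain)
--                     else:
--                         cycle_chains.append(chain + [previous_node])
--             if neighbor == start_node and recursion_level == max_recursion_level - 1:
--                 cycle_chains.append([node, previous_node])
--
--     return cycle_chains
-- ===== SOURCE B (Python) =====
-- def dfs_recursion(
--         node,
--         start_node,
--         previous_node,
--         graph,
--         recursion_level,
--         max_recursion_level,
-- ):
--     # Iterative level-by-level path expansion instead of recursion.
--     depth = max_recursion_level - recursion_level
--     if depth <= 0:
--         return []
--     frontier = [[node]]  # partial paths, most recently visited node first
--     for _ in range(depth - 1):
--         if not frontier:
--             break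
--         new_frontier = []
--         for path in frontier:
--             prev = path[1] if len(path) > 1 else previous_node
--             for nb in graph[path[0]]:
--                 if nb != prev:
--                     new_frontier.append([nb] + path)
--         frontier = new_frontier
--     tail = [] if previous_node is None else [previous_node]
--     chains = []
--     for path in frontier:
--         for nb in graph[path[0]]:
--             if nb == start_node:
--                 chains.append(path + tail)
--     return chains
-- ===== Notes on version B (the rewrite author's own statement) =====
-- stated objective: alternative
-- what changed: Replaces the recursive DFS by an iterative level-by-level frontier expansion of partial paths (stored newest-node-first) with a final emission pass, instead of building chains bottom-up through nested recursive calls.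
-- outside the precondition, e.g. on dfs_recursion('a', 'c', None, {'a': ['c']}, 1, 2): A returns [['a', None]], B returns [['a']]
import Mathlib
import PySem

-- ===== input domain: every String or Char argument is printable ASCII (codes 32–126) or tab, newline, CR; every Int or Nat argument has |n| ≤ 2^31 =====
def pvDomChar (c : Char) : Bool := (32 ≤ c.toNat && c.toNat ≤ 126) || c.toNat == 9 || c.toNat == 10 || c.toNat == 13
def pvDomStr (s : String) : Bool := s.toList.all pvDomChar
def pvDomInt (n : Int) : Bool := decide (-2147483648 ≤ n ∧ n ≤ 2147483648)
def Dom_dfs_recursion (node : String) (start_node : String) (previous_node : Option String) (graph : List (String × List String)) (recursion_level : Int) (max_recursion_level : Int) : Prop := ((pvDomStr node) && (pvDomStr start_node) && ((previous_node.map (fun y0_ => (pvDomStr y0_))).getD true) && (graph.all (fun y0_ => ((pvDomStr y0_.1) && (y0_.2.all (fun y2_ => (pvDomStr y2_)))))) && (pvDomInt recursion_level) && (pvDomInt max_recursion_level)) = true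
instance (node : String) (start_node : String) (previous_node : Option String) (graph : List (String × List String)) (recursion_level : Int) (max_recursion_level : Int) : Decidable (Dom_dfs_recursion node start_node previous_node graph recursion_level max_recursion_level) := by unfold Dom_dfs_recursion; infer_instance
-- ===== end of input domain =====

-- B replaces the recursion by an iterative level-by-level frontier expansion of partial paths (alternative decomposition, same cost).


-- ===== PORT A =====
-- 'graph[node]' (graph is a Python dict): first-match lookup via PySem.Dict; [] only on the
-- KeyError inputs, which Pre_ excludes (shared by both ports, as both Pythons subscript graph)
def pvNbrs (graph : List (String × List String)) (node : String) : List String :=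
  PySem.Dict.getD (PySem.Dict.mk graph) node []

-- 'chain' if previous_node is None else 'chain + [previous_node]'
def pvAppendPrev (previous_node : Option String) (chain : List String) : List String :=
  match previous_node with
  | none => chain
  | some p => chain ++ [p]

-- literal port of A's recursion; 'graph[node]' is PySem.Dict.getD (the KeyError inputs
-- are excluded by Pre_), and the leaf append '[node, previous_node]' is written
-- [node] ++ previous_node.toList (the previous_node = None case there is excluded by Pre_,
-- since Python then returns a list containing None, which is not a list[str]).
def dfs_recursion (node : String) (start_node : String) (previous_node : Option String) (graph : List (String × List String)) (recursion_level : Int) (max_recursion_level : Int) : List (List String) :=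
  if recursion_level < max_recursion_level then
    (pvNbrs graph node).flatMap (fun neighbor =>
      (if some neighbor ≠ previous_node then
        (dfs_recursion neighbor start_node (some node) graph (recursion_level + 1) max_recursion_level).map
          (pvAppendPrev previous_node)
       else [])
      ++
      (if neighbor = start_node ∧ recursion_level = max_recursion_level - 1 then
        [[node] ++ previous_node.toList]
       else []))
  else []
termination_by (max_recursion_level - recursion_level).toNat
decreasing_by omega

-- ===== PORT B =====
-- one expansion round: 'for path in frontier: for nb in graph[path[0]]: if nb != prev: append [nb]+path'
def pvStep (graph : List (String × List String)) (previous_node : Option String) (frontier : List (List String)) : List (List String) :=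
  frontier.flatMap (fun path =>
    match path with
    | [] => []   -- unreachable: frontier paths are always nonempty
    | cur :: rest =>
      let prev : Option String := match rest with | p :: _ => some p | [] => previous_node
      ((pvNbrs graph cur).filter (fun nb => some nb ≠ prev)).map (fun nb => nb :: cur :: rest))

-- the 'for _ in range(depth - 1)' loop
def pvIter (graph : List (String × List String)) (previous_node : Option String) : Nat → List (List String) → List (List String)
  | 0, frontier => frontier
  | _ + 1, [] => []   -- 'if not frontier: break'
  | k + 1, q :: f => pvIter graph previous_node k (pvStep graph previous_node (q :: f))

-- final emission: 'for path in frontier: for nb in graph[path[0]]: if nb == start_node: append path + tail'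
def pvEmit (graph : List (String × List String)) (start_node : String) (tail : List String) (frontier : List (List String)) : List (List String) :=
  frontier.flatMap (fun path =>
    match path with
    | [] => []   -- unreachable
    | cur :: _ =>
      ((pvNbrs graph cur).filter (fun nb => nb = start_node)).map (fun _ => path ++ tail))

def dfs_recursion_alt (node : String) (start_node : String) (previous_node : Option String) (graph : List (String × List String)) (recursion_level : Int) (max_recursion_level : Int) : List (List String) :=
  if max_recursion_level - recursion_level ≤ 0 then []
  else
    pvEmit graph start_node previous_node.toList
      (pvIter graph previous_node (max_recursion_level - recursion_level - 1).toNat [[node]])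

-- ===== PRECONDITION & SPEC =====
-- Pre_ excludes exactly two kinds of inputs. (i) Inputs where Python A raises KeyError: when it
-- recurses (level < max) the start node, and for deeper recursion every listed neighbour, must be a
-- key of the graph (the 'every neighbour' closure is slightly wider than the reachable set A
-- actually touches — a closed-form graph-well-formedness condition instead of re-simulating the
-- DFS). (ii) The corner previous_node = None with
-- recursion_level = max_recursion_level - 1 and start_node a neighbour of node, where A returns a
-- list containing None — not a value of the declared type list[list[str]] (B returns the chain
-- without the None).
def Pre_dfs_recursion (node : String) (start_node : String) (previous_node : Option String) (graph : List (String × List String)) (recursion_level : Int) (max_recursion_level : Int) : Prop :=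
  (recursion_level < max_recursion_level →
    (((PySem.Dict.mk graph).get? node).isSome = true ∧
     ¬(previous_node = none ∧ recursion_level = max_recursion_level - 1 ∧
        start_node ∈ pvNbrs graph node))) ∧
  (recursion_level < max_recursion_level - 1 →
    ∀ kv ∈ graph, ∀ v ∈ kv.2, ((PySem.Dict.mk graph).get? v).isSome = true)
instance (node : String) (start_node : String) (previous_node : Option String) (graph : List (String × List String)) (recursion_level : Int) (max_recursion_level : Int) : Decidable (Pre_dfs_recursion node start_node previous_node graph recursion_level max_recursion_level) := by unfold Pre_dfs_recursion; infer_instance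

def pvWitness_dfs_recursion : String × String × Option String × (List (String × List String)) × Int × Int :=
  ("a", "a", none, [("a", ["b", "c"]), ("b", ["a", "c"]), ("c", ["a", "b"])], 0, 3)

def Spec_dfs_recursion (node : String) (start_node : String) (previous_node : Option String) (graph : List (String × List String)) (recursion_level : Int) (max_recursion_level : Int) (out : List (List String)) : Prop := out = dfs_recursion_alt node start_node previous_node graph recursion_level max_recursion_level
instance (node : String) (start_node : String) (previous_node : Option String) (graph : List (String × List String)) (recursion_level : Int) (max_recursion_level : Int) (out : List (List String)) : Decidable (Spec_dfs_recursion node start_node previous_node graph recursion_level max_recursion_level out) := by unfold Spec_dfs_recursion; infer_instance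

-- ===== CLAIM (what is proved, stated in full; the proofs are below) =====
def Claim_equal_dfs_recursion : Prop := ∀ (node : String) (start_node : String) (previous_node : Option String) (graph : List (String × List String)) (recursion_level : Int) (max_recursion_level : Int), Dom_dfs_recursion node start_node previous_node graph recursion_level max_recursion_level → Pre_dfs_recursion node start_node previous_node graph recursion_level max_recursion_level → Spec_dfs_recursion node start_node previous_node graph recursion_level max_recursion_level (dfs_recursion node start_node previous_node graph recursion_level max_recursion_level)

-- ===== LEMMAS AND PROOFS =====

theorem pvAppendPrev_eq (prev : Option String) (chain : List String) :
    pvAppendPrev prev chain = chain ++ prev.toList := by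
  cases prev <;> simp [pvAppendPrev]

-- every path produced by pvStep is nonempty
theorem pvStep_ne_nil (graph : List (String × List String)) (p : Option String) (frontier : List (List String)) :
    ∀ r ∈ pvStep graph p frontier, r ≠ [] := by
  intro r hr
  simp only [pvStep, List.mem_flatMap] at hr
  obtain ⟨path, -, hr⟩ := hr
  match path with
  | [] => simp at hr
  | cur :: rest =>
    simp only [List.mem_map] at hr
    obtain ⟨nb, -, rfl⟩ := hr
    simp

theorem pvStep_nil (graph : List (String × List String)) (p : Option String) :
    pvStep graph p [] = [] := by
  simp [pvStep]

theorem pvStep_append (graph : List (String × List String)) (p : Option String)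
    (f₁ f₂ : List (List String)) :
    pvStep graph p (f₁ ++ f₂) = pvStep graph p f₁ ++ pvStep graph p f₂ := by
  simp [pvStep]

theorem pvIter_nil (graph : List (String × List String)) (p : Option String) :
    ∀ k : Nat, pvIter graph p k [] = [] := by
  intro k
  induction k with
  | zero => rfl
  | succ k ih => simp [pvIter, pvStep_nil, ih]

-- pvIter distributes over the frontier list
theorem pvIter_flatMap (graph : List (String × List String)) (p : Option String) :
    ∀ (k : Nat) (frontier : List (List String)),
      pvIter graph p k frontier = frontier.flatMap (fun q => pvIter graph p k [q]) := by
  intro k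
  induction k with
  | zero => intro f; simp [pvIter]
  | succ k ih =>
    intro f
    induction f with
    | nil => simp [pvIter_nil]
    | cons q f ihf =>
      calc pvIter graph p (k + 1) (q :: f)
          = pvIter graph p k (pvStep graph p ([q] ++ f)) := rfl
        _ = pvIter graph p k (pvStep graph p [q] ++ pvStep graph p f) := by
            rw [pvStep_append]
        _ = (pvStep graph p [q] ++ pvStep graph p f).flatMap (fun r => pvIter graph p k [r]) :=
            ih _
        _ = (pvStep graph p [q]).flatMap (fun r => pvIter graph p k [r])
              ++ (pvStep graph p f).flatMap (fun r => pvIter graph p k [r]) := by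
            rw [List.flatMap_append]
        _ = pvIter graph p k (pvStep graph p [q]) ++ pvIter graph p k (pvStep graph p f) := by
            rw [← ih, ← ih]
        _ = pvIter graph p (k + 1) [q] ++ pvIter graph p (k + 1) f := by
            cases f <;> simp [pvIter, pvStep_nil, pvIter_nil]
        _ = (q :: f).flatMap (fun q => pvIter graph p (k + 1) [q]) := by
            rw [List.flatMap_cons, ← ihf]

-- the 'extension' lemma: iterating on a path extended at the bottom by one old node x,
-- with any ambient previous_node, equals iterating on the unextended path with
-- previous_node = some x and appending x to every resulting path
theorem pvIter_ext (graph : List (String × List String)) :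
    ∀ (k : Nat) (p : Option String) (x : String) (q : List String), q ≠ [] →
      pvIter graph p k [q ++ [x]] = (pvIter graph (some x) k [q]).map (fun r => r ++ [x]) := by
  intro k
  induction k with
  | zero => intro p x q _; simp [pvIter]
  | succ k ih =>
    intro p x q hq
    match q with
    | [] => exact absurd rfl hq
    | cur :: rest =>
      have hstep : pvStep graph p [(cur :: rest) ++ [x]]
          = (pvStep graph (some x) [cur :: rest]).map (fun r => r ++ [x]) := by
        match rest with
        | [] => simp [pvStep, List.map_map]
        | r0 :: rest' => simp [pvStep, List.map_map]
      show pvIter graph p k (pvStep graph p [(cur :: rest) ++ [x]]) = _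
      rw [hstep, pvIter_flatMap graph p k, List.flatMap_map]
      have hcong : ∀ r ∈ pvStep graph (some x) [cur :: rest],
          pvIter graph p k [r ++ [x]] = (pvIter graph (some x) k [r]).map (fun s => s ++ [x]) := by
        intro r hr
        exact ih p x r (pvStep_ne_nil graph (some x) [cur :: rest] r hr)
      rw [List.flatMap_congr hcong]
      show _ = (pvIter graph (some x) k (pvStep graph (some x) [cur :: rest])).map (fun r => r ++ [x])
      rw [pvIter_flatMap graph (some x) k (pvStep graph (some x) [cur :: rest])]
      rw [List.map_flatMap]

-- pvEmit after extending every path by x = pvEmit with tail [x], then appending the real tail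
theorem pvEmit_map_ext (graph : List (String × List String)) (start : String) (t : List String)
    (frontier : List (List String)) (x : String) (hne : ∀ r ∈ frontier, r ≠ []) :
    pvEmit graph start t (frontier.map (fun r => r ++ [x]))
      = (pvEmit graph start [x] frontier).map (fun r => r ++ t) := by
  induction frontier with
  | nil => simp [pvEmit]
  | cons q f ih =>
    have hq : q ≠ [] := hne q (by simp)
    have hf : ∀ r ∈ f, r ≠ [] := fun r hr => hne r (by simp [hr])
    match q with
    | [] => exact absurd rfl hq
    | cur :: rest =>
      simp only [List.map_cons, pvEmit, List.flatMap_cons] at *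
      rw [ih hf]
      simp [List.map_map, List.map_append, List.append_assoc]

theorem pvEmit_append (graph : List (String × List String)) (start : String) (t : List String)
    (f₁ f₂ : List (List String)) :
    pvEmit graph start t (f₁ ++ f₂) = pvEmit graph start t f₁ ++ pvEmit graph start t f₂ := by
  simp [pvEmit]

theorem pvEmit_flatMap {α : Type} (graph : List (String × List String)) (start : String)
    (t : List String) (xs : List α) (h : α → List (List String)) :
    pvEmit graph start t (xs.flatMap h) = xs.flatMap (fun a => pvEmit graph start t (h a)) := by
  induction xs with
  | nil => simp [pvEmit]
  | cons a xs ih => simp only [List.flatMap_cons, pvEmit_append, ih]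

-- flatMap of a guarded singleton is filter-then-map
theorem flatMap_guard_singleton {α β : Type} (xs : List α) (p : α → Prop) [DecidablePred p] (f : α → β) :
    xs.flatMap (fun a => if p a then [f a] else []) = (xs.filter (fun a => p a)).map f := by
  induction xs with
  | nil => simp
  | cons a xs ih =>
    by_cases h : p a <;> simp [h, ih]

-- flatMap with an if-guard is flatMap over the filtered list
theorem flatMap_if_filter {α β : Type} (xs : List α) (p : α → Prop) [DecidablePred p] (f : α → List β) :
    xs.flatMap (fun a => if p a then f a else []) = (xs.filter (fun a => p a)).flatMap f := by
  induction xs with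
  | nil => simp
  | cons a xs ih =>
    by_cases h : p a <;> simp [h, ih]

-- paths inside the iterated frontier stay nonempty
theorem pvIter_ne_nil (graph : List (String × List String)) (p : Option String) :
    ∀ (k : Nat) (frontier : List (List String)), (∀ q ∈ frontier, q ≠ []) →
      ∀ r ∈ pvIter graph p k frontier, r ≠ [] := by
  intro k
  induction k with
  | zero => intro f hf; simpa [pvIter] using hf
  | succ k ih =>
    intro f hf
    match f with
    | [] =>
      intro r hr
      rw [show pvIter graph p (k + 1) ([] : List (List String)) = [] from rfl] at hr
      simp at hr
    | q :: f' =>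
      exact ih (pvStep graph p (q :: f')) (pvStep_ne_nil graph p (q :: f'))

-- main lemma: one call of A's recursion equals (depth-1) frontier expansions plus emission
theorem pv_main (graph : List (String × List String)) (start : String) :
    ∀ (d : Nat) (node : String) (prev : Option String) (l m : Int), m - l = (d : Int) + 1 →
      dfs_recursion node start prev graph l m
        = pvEmit graph start prev.toList (pvIter graph prev d [[node]]) := by
  intro d
  induction d with
  | zero =>
    intro node prev l m hd
    have hl : l < m := by omega
    have hl1 : l = m - 1 := by omega
    rw [dfs_recursion, if_pos hl]
    have hrec : ∀ nb : String, dfs_recursion nb start (some node) graph (l + 1) m = [] := by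
      intro nb; rw [dfs_recursion, if_neg (by omega)]
    calc (pvNbrs graph node).flatMap (fun neighbor =>
          (if some neighbor ≠ prev then
            (dfs_recursion neighbor start (some node) graph (l + 1) m).map (pvAppendPrev prev)
           else [])
          ++ (if neighbor = start ∧ l = m - 1 then [[node] ++ prev.toList] else []))
        = (pvNbrs graph node).flatMap (fun neighbor =>
            if neighbor = start then [[node] ++ prev.toList] else []) := by
          apply List.flatMap_congr; intro nb _
          rw [hrec nb]
          by_cases h : some nb ≠ prev <;> by_cases h2 : nb = start <;>
            simp [h, h2, hl1]
      _ = ((pvNbrs graph node).filter (fun nb => nb = start)).map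
            (fun _ => [node] ++ prev.toList) :=
          flatMap_guard_singleton (pvNbrs graph node) (fun nb => nb = start)
            (fun _ => [node] ++ prev.toList)
      _ = pvEmit graph start prev.toList (pvIter graph prev 0 [[node]]) := by
          rw [show pvIter graph prev 0 [[node]] = [[node]] from rfl]
          simp [pvEmit]
  | succ d ih =>
    intro node prev l m hd
    have hl : l < m := by omega
    have hleaf : l ≠ m - 1 := by omega
    rw [dfs_recursion, if_pos hl]
    calc (pvNbrs graph node).flatMap (fun neighbor =>
          (if some neighbor ≠ prev then
            (dfs_recursion neighbor start (some node) graph (l + 1) m).map (pvAppendPrev prev)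
           else [])
          ++ (if neighbor = start ∧ l = m - 1 then [[node] ++ prev.toList] else []))
        = (pvNbrs graph node).flatMap (fun neighbor =>
            if some neighbor ≠ prev then
              (pvEmit graph start [node] (pvIter graph (some node) d [[neighbor]])).map
                (fun chain => chain ++ prev.toList)
            else []) := by
          apply List.flatMap_congr; intro nb _
          have hno : ¬(nb = start ∧ l = m - 1) := fun h => hleaf h.2
          rw [ih nb (some node) (l + 1) m (by omega)]
          simp only [hno, if_false, List.append_nil]
          by_cases h : some nb ≠ prev
          · simp only [h, if_true, if_pos h]
            congr 1
            funext chain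
            exact pvAppendPrev_eq prev chain
          · simp [h]
      _ = ((pvNbrs graph node).filter (fun nb => some nb ≠ prev)).flatMap
            (fun nb => (pvEmit graph start [node] (pvIter graph (some node) d [[nb]])).map
              (fun chain => chain ++ prev.toList)) := by
          rw [flatMap_if_filter]
      _ = ((pvNbrs graph node).filter (fun nb => some nb ≠ prev)).flatMap
            (fun nb => pvEmit graph start prev.toList (pvIter graph prev d [[nb, node]])) := by
          apply List.flatMap_congr; intro nb _
          have h1 : pvIter graph prev d [[nb, node]]
              = (pvIter graph (some node) d [[nb]]).map (fun r => r ++ [node]) := by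
            have := pvIter_ext graph d prev node [nb] (by simp)
            simpa using this
          rw [h1, pvEmit_map_ext graph start prev.toList (pvIter graph (some node) d [[nb]]) node
                (pvIter_ne_nil graph (some node) d [[nb]] (by simp))]
      _ = pvEmit graph start prev.toList (pvIter graph prev (d + 1) [[node]]) := by
          have hstep : pvStep graph prev [[node]]
              = ((pvNbrs graph node).filter (fun nb => some nb ≠ prev)).map
                  (fun nb => [nb, node]) := by
            simp [pvStep]
          show _ = pvEmit graph start prev.toList (pvIter graph prev d (pvStep graph prev [[node]]))
          rw [hstep, pvIter_flatMap graph prev d, List.flatMap_map, pvEmit_flatMap]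

-- ===== VERDICT (by name: the statement is the Claim_ definition above) =====
theorem dfs_recursion_spec : Claim_equal_dfs_recursion := by
  intro node start prev graph l m _ _
  unfold Spec_dfs_recursion dfs_recursion_alt
  by_cases h : m - l ≤ 0
  · rw [if_pos h, dfs_recursion, if_neg (by omega)]
  · rw [if_neg h]
    have hd : m - l = ((m - l - 1).toNat : Int) + 1 := by omega
    exact pv_main graph start (m - l - 1).toNat node prev l m hd
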